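-- pv_equiv track=rewrite | github.com/MyxaWanyuha/HW | PythonApplication3/PythonApplication3/HomeWork1.py | DFS
-- ===== SOURCE A (Python) =====
-- def FindNodes(v, edges):
--     res = []
--     for i in edges:
--         if v == i[0]:
--             res.append(i[1])
--         if v == i[1]:
--             res.append(i[0])
--     return res
--
-- def GetVertices(edges):
--     vertices = [1]
--     for edge in edges:
--         for i in edge:
--             if i not in vertices:
--                 vertices.append(i)
--     return vertices
--
-- def DFS(edges):
--     def dfs(v: int, edges: list, visited: dict, d_edges: list, rev_edges: list, father: dict, step: int):
--         visited[v] = step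
--         step += 1
--         for u in FindNodes(v, edges):
--             if visited[u] == 0:
--                 d_edges.append((u, v))
--                 father[u] = v
--                 dfs(u, edges, visited, d_edges, rev_edges, father, step)
--             elif visited[u] < visited[v] and father[v] != u:
--                 rev_edges.append((u, v))
--
--     d_edges = []
--     rev_edges = []
--     visited = {}
--     v_list = GetVertices(edges)
--     father = {}
--     for i in v_list:
--         visited[i] = 0
--     for v in v_list:
--         if visited[v] == 0:
--             father[v] = 1
--             dfs(v, edges, visited, d_edges, rev_edges, father, 1)
--     return d_edges, rev_edges
-- ===== SOURCE B (Python) =====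
-- def DFS(edges):
--     # Build adjacency lists once (edge order preserved), instead of rescanning
--     # the whole edge list for every vertex.
--     adj = {}
--     for a, b in edges:
--         adj.setdefault(a, []).append(b)
--         adj.setdefault(b, []).append(a)
--
--     # Vertices: 1 first, then endpoints in first-occurrence order.
--     vertices = list(dict.fromkeys([1] + [x for e in edges for x in e]))
--
--     tree_edges = []
--     back_edges = []
--     depth = {v: 0 for v in vertices}
--
--     def dfs(v, parent, d):
--         depth[v] = d
--         for u in adj.get(v, []):
--             if depth[u] == 0:
--                 tree_edges.append((u, v))
--                 dfs(u, v, d + 1)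
--             elif depth[u] < d and u != parent:
--                 back_edges.append((u, v))
--
--     for v in vertices:
--         if depth[v] == 0:
--             dfs(v, 1, 1)
--     return tree_edges, back_edges
-- ===== Notes on version B (the rewrite author's own statement) =====
-- stated objective: faster
-- what changed: B builds an adjacency dict once (replacing A's per-vertex rescan of the whole edge list in FindNodes), collects vertices with one ordered dedup instead of a quadratic membership loop, and threads the parent and depth as dfs parameters instead of A's father dict and copied step counter.
import Mathlib
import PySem

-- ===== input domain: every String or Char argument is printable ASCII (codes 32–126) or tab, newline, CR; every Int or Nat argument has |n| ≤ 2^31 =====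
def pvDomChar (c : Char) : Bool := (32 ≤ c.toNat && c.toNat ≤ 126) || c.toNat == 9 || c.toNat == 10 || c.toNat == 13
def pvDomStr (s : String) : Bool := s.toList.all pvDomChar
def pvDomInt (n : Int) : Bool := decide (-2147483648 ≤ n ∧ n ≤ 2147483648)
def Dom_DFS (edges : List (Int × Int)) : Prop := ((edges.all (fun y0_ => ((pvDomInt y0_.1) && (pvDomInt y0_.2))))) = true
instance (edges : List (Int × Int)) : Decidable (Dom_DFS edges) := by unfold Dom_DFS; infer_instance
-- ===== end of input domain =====

-- B replaces A's per-vertex rescan of the whole edge list (FindNodes) by an adjacency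
-- dict built once, and drops the father dict in favour of a parent parameter: O(V+E)
-- instead of O(V*E). Equivalence of the return value is proved for all inputs.

-- ===== PORT A =====
def FindNodes (v : Int) (edges : List (Int × Int)) : List Int :=
  edges.foldl (fun res i =>
    let res := if v = i.1 then res ++ [i.2] else res
    if v = i.2 then res ++ [i.1] else res) []

def GetVertices (edges : List (Int × Int)) : List Int :=
  edges.foldl (fun vertices edge =>
    [edge.1, edge.2].foldl (fun vertices i =>
      if i ∈ vertices then vertices else vertices ++ [i]) vertices) [1]

structure StA where
  visited : PySem.Dict Int Int
  dE : List (Int × Int)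
  rE : List (Int × Int)
  father : PySem.Dict Int Int
deriving Repr

-- visited[u] / father[v]: the keys are always present on reachable states
-- (every u is an endpoint, father[v] is set before dfs(v)), so getD is exact there.
-- fuel only bounds the recursion depth (≤ number of vertices < 2*|edges|+2): a totality guard.
-- the neighbour loop of dfs; `recur` is the recursive call (dfs with one unit of fuel spent)
def goA (v step : Int) (recur : Int → Int → StA → StA) :
    List Int → StA → StA
  | [], st => st
  | u :: rest, st =>
    if st.visited.getD u 0 = 0 then
      let st' := { st with dE := st.dE ++ [(u, v)], father := st.father.insert u v }
      goA v step recur rest (recur u step st')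
    else if st.visited.getD u 0 < st.visited.getD v 0 ∧ st.father.getD v 0 ≠ u then
      goA v step recur rest { st with rE := st.rE ++ [(u, v)] }
    else
      goA v step recur rest st

def dfsA (edges : List (Int × Int)) : Nat → Int → Int → StA → StA
  | 0, _, _, st => st
  | fuel + 1, v, step, st =>
    let st := { st with visited := st.visited.insert v step }
    goA v (step + 1) (dfsA edges fuel) (FindNodes v edges) st

def DFS (edges : List (Int × Int)) : (List (Int × Int)) × (List (Int × Int)) :=
  let v_list := GetVertices edges
  let visited0 := v_list.foldl (fun d i => d.insert i 0) PySem.Dict.empty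
  let st0 : StA := ⟨visited0, [], [], PySem.Dict.empty⟩
  let fin := v_list.foldl (fun st v =>
    if st.visited.getD v 0 = 0 then
      dfsA edges (2 * edges.length + 2) v 1 { st with father := st.father.insert v 1 }
    else st) st0
  (fin.dE, fin.rE)

-- ===== PORT B =====
def buildAdj (edges : List (Int × Int)) : PySem.Dict Int (List Int) :=
  edges.foldl (fun adj e =>
    (adj.modify e.1 [] (· ++ [e.2])).modify e.2 [] (· ++ [e.1])) PySem.Dict.empty

structure StB where
  depth : PySem.Dict Int Int
  tE : List (Int × Int)
  bE : List (Int × Int)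
deriving Repr

-- depth[u]: keys always present (every u is an endpoint); getD exact there.
-- fuel: same totality guard as in port A.
-- the neighbour loop; `recur` is the recursive call (dfs with one unit of fuel spent)
def goB (v parent d : Int) (recur : Int → Int → Int → StB → StB) :
    List Int → StB → StB
  | [], st => st
  | u :: rest, st =>
    if st.depth.getD u 0 = 0 then
      let st' := { st with tE := st.tE ++ [(u, v)] }
      goB v parent d recur rest (recur u v (d + 1) st')
    else if st.depth.getD u 0 < d ∧ u ≠ parent then
      goB v parent d recur rest { st with bE := st.bE ++ [(u, v)] }
    else
      goB v parent d recur rest st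

def dfsB (adj : PySem.Dict Int (List Int)) : Nat → Int → Int → Int → StB → StB
  | 0, _, _, _, st => st
  | fuel + 1, v, parent, d, st =>
    let st := { st with depth := st.depth.insert v d }
    goB v parent d (dfsB adj fuel) (adj.getD v []) st

def DFS_alt (edges : List (Int × Int)) : (List (Int × Int)) × (List (Int × Int)) :=
  let adj := buildAdj edges
  let vertices := PySem.List.dedup (1 :: edges.flatMap (fun e => [e.1, e.2]))
  let depth0 := vertices.foldl (fun d v => d.insert v 0) PySem.Dict.empty
  let st0 : StB := ⟨depth0, [], []⟩
  let fin := vertices.foldl (fun st v =>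
    if st.depth.getD v 0 = 0 then
      dfsB adj (2 * edges.length + 2) v 1 1 st
    else st) st0
  (fin.tE, fin.bE)

-- ===== PRECONDITION & SPEC =====
def Spec_DFS (edges : List (Int × Int)) (out : (List (Int × Int)) × (List (Int × Int))) : Prop := out = DFS_alt edges
instance (edges : List (Int × Int)) (out : (List (Int × Int)) × (List (Int × Int))) : Decidable (Spec_DFS edges out) := by unfold Spec_DFS; infer_instance

-- ===== CLAIM (what is proved, stated in full; the proofs are below) =====
def Claim_equal_DFS : Prop := ∀ (edges : List (Int × Int)), Dom_DFS edges → Spec_DFS edges (DFS edges)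

-- ===== LEMMAS AND PROOFS =====

-- the per-edge contribution to FindNodes
def delta (v : Int) (i : Int × Int) : List Int :=
  (if v = i.1 then [i.2] else []) ++ (if v = i.2 then [i.1] else [])

lemma findNodes_acc (v : Int) (l : List (Int × Int)) :
    ∀ acc : List Int,
      l.foldl (fun res i =>
        let res := if v = i.1 then res ++ [i.2] else res
        if v = i.2 then res ++ [i.1] else res) acc = acc ++ l.flatMap (delta v) := by
  induction l with
  | nil => intro acc; simp
  | cons e t ih =>
    intro acc
    simp only [List.foldl_cons, List.flatMap_cons]
    rw [ih]
    simp only [delta]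
    split_ifs <;> simp

lemma findNodes_eq (v : Int) (l : List (Int × Int)) :
    FindNodes v l = l.flatMap (delta v) := by
  simpa [FindNodes] using findNodes_acc v l []

lemma adj_getD (l : List (Int × Int)) (dct : PySem.Dict Int (List Int)) (v : Int) :
    (l.foldl (fun adj e =>
      (adj.modify e.1 [] (· ++ [e.2])).modify e.2 [] (· ++ [e.1])) dct).getD v [] =
    dct.getD v [] ++ FindNodes v l := by
  induction l generalizing dct with
  | nil => simp [FindNodes]
  | cons e l ih =>
    simp only [List.foldl_cons]
    rw [ih]
    have hone : ((dct.modify e.1 [] (· ++ [e.2])).modify e.2 [] (· ++ [e.1])).getD v [] =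
        dct.getD v [] ++ delta v e := by
      simp only [PySem.Dict.getD_modify]
      split_ifs <;> simp_all [delta]
    rw [hone, findNodes_eq v (e :: l), List.flatMap_cons, ← findNodes_eq, List.append_assoc]

lemma adj_find (edges : List (Int × Int)) (v : Int) :
    (buildAdj edges).getD v [] = FindNodes v edges := by
  rw [buildAdj, adj_getD]
  simp

lemma verts_eq (edges : List (Int × Int)) :
    GetVertices edges = PySem.List.dedup (1 :: edges.flatMap (fun e => [e.1, e.2])) := by
  have hadd : (fun (vs : List Int) (i : Int) => if i ∈ vs then vs else vs ++ [i]) =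
      PySem.Set.add := by
    funext s x; exact (PySem.Set.add_eq_ite s x).symm
  have hgen : ∀ (l : List (Int × Int)) (acc : List Int),
      l.foldl (fun vs e => PySem.Set.add (PySem.Set.add vs e.1) e.2) acc =
      (l.flatMap (fun e => [e.1, e.2])).foldl PySem.Set.add acc := by
    intro l
    induction l with
    | nil => intro acc; simp
    | cons e l ih =>
      intro acc
      simp only [List.foldl_cons, List.foldl_nil, List.flatMap_cons, List.foldl_append, ih]
  rw [GetVertices]
  simp only [hadd, List.foldl_cons, List.foldl_nil]
  rw [hgen, PySem.List.dedup_eq_ofList, PySem.Set.ofList_eq_foldl, List.foldl_cons]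
  rw [show PySem.Set.add ([] : List Int) 1 = [1] by decide]

-- relation between the two programs' states: same visited/depth dict, same edge lists
def RelS (sa : StA) (sb : StB) : Prop :=
  sa.visited = sb.depth ∧ sa.dE = sb.tE ∧ sa.rE = sb.bE

-- "f only touches vertices that are still unvisited": preservation property of dfs
def PresA (f : Int → Int → StA → StA) : Prop :=
  ∀ u step st, st.visited.getD u 0 = 0 →
    ∀ w, st.visited.getD w 0 ≠ 0 →
      (f u step st).visited.getD w 0 = st.visited.getD w 0 ∧
      (f u step st).father.getD w 0 = st.father.getD w 0

lemma presG (v step : Int) (recur : Int → Int → StA → StA) (hrec : PresA recur) :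
    ∀ (ns : List Int) (st : StA) (w : Int), st.visited.getD w 0 ≠ 0 →
      (goA v step recur ns st).visited.getD w 0 = st.visited.getD w 0 ∧
      (goA v step recur ns st).father.getD w 0 = st.father.getD w 0 := by
  intro ns
  induction ns with
  | nil => intro st w hw; simp [goA]
  | cons u rest ih =>
    intro st w hw
    by_cases h0 : st.visited.getD u 0 = 0
    · have hwu : w ≠ u := fun h => hw (h ▸ h0)
      simp only [goA, if_pos h0]
      set st' : StA := { st with dE := st.dE ++ [(u, v)], father := st.father.insert u v } with hst'
      have h1 := hrec u step st' (by simp [hst', h0]) w (by simp [hst', hw])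
      have h2 := ih (recur u step st') w (by rw [h1.1]; simp [hst', hw])
      refine ⟨?_, ?_⟩
      · rw [h2.1, h1.1]
      · rw [h2.2, h1.2]
        simp [hst', PySem.Dict.getD_insert, hwu]
    · by_cases h1 : st.visited.getD u 0 < st.visited.getD v 0 ∧ st.father.getD v 0 ≠ u
      · simp only [goA, if_neg h0, if_pos h1]
        exact ih _ w hw
      · simp only [goA, if_neg h0, if_neg h1]
        exact ih st w hw

lemma presD (edges : List (Int × Int)) : ∀ fuel, PresA (dfsA edges fuel) := by
  intro fuel
  induction fuel with
  | zero => unfold PresA; intro u step st _ w hw; simp [dfsA]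
  | succ fuel ih =>
    unfold PresA
    intro u step st h0 w hw
    have hwu : w ≠ u := fun h => hw (h ▸ h0)
    simp only [dfsA]
    have h := presG u (step + 1) (dfsA edges fuel) ih (FindNodes u edges)
      { st with visited := st.visited.insert u step } w
      (by simp [PySem.Dict.getD_insert, hwu, hw])
    rw [h.1, h.2]
    simp [PySem.Dict.getD_insert, hwu]

-- "the two dfs functions agree": the inductive property threaded through the loops
def EqAB (fA : Int → Int → StA → StA) (fB : Int → Int → Int → StB → StB) : Prop :=
  ∀ u parent d sa sb, RelS sa sb → sa.father.getD u 0 = parent → (0 : Int) < d →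
    RelS (fA u d sa) (fB u parent d sb)

lemma eqG (v parent d : Int) (fA : Int → Int → StA → StA)
    (fB : Int → Int → Int → StB → StB)
    (hrec : EqAB fA fB) (hpres : PresA fA) (hd : (0 : Int) < d) :
    ∀ (ns : List Int) (sa : StA) (sb : StB), RelS sa sb →
      sa.father.getD v 0 = parent → sa.visited.getD v 0 = d →
      RelS (goA v (d + 1) fA ns sa) (goB v parent d fB ns sb) := by
  intro ns
  induction ns with
  | nil => intro sa sb hrel _ _; simpa [goA, goB] using hrel
  | cons u rest ih =>
    intro sa sb hrel hfv hvv
    obtain ⟨hvis, hdE, hrE⟩ := hrel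
    by_cases h0 : sa.visited.getD u 0 = 0
    · have hvu : v ≠ u := fun h => by rw [← h, hvv] at h0; omega
      simp only [goA, goB, if_pos h0, if_pos (show sb.depth.getD u 0 = 0 by rw [← hvis]; exact h0)]
      set sa' : StA := { sa with dE := sa.dE ++ [(u, v)], father := sa.father.insert u v } with hsa'
      set sb' : StB := { sb with tE := sb.tE ++ [(u, v)] } with hsb'
      have hrel' : RelS sa' sb' := ⟨hvis, by simp [hsa', hsb', hdE], hrE⟩
      have hrecur := hrec u v (d + 1) sa' sb' hrel'
        (by simp [hsa']) (by omega)
      have hd0 : d ≠ 0 := by omega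
      have hkeep := hpres u (d + 1) sa' (by simp [hsa', h0]) v
        (by simp [hsa', hvv, hd0])
      refine ih (fA u (d + 1) sa') (fB u v (d + 1) sb') hrecur ?_ ?_
      · rw [hkeep.2]
        simp [hsa', PySem.Dict.getD_insert, hvu, hfv]
      · rw [hkeep.1]
        simpa [hsa'] using hvv
    · have h0b : ¬ sb.depth.getD u 0 = 0 := by rw [← hvis]; exact h0
      by_cases h1 : sa.visited.getD u 0 < d ∧ u ≠ parent
      · have hA : sa.visited.getD u 0 < sa.visited.getD v 0 ∧ sa.father.getD v 0 ≠ u := by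
          rw [hvv, hfv]; exact ⟨h1.1, h1.2.symm⟩
        have hB : sb.depth.getD u 0 < d ∧ u ≠ parent := by rw [← hvis]; exact h1
        simp only [goA, goB, if_neg h0, if_neg h0b, if_pos hA, if_pos hB]
        exact ih _ _ ⟨hvis, hdE, by simp [hrE]⟩ hfv hvv
      · have hA : ¬ (sa.visited.getD u 0 < sa.visited.getD v 0 ∧ sa.father.getD v 0 ≠ u) := by
          rw [hvv, hfv]
          intro hc; exact h1 ⟨hc.1, hc.2.symm⟩
        have hB : ¬ (sb.depth.getD u 0 < d ∧ u ≠ parent) := by rw [← hvis]; exact h1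
        simp only [goA, goB, if_neg h0, if_neg h0b, if_neg hA, if_neg hB]
        exact ih _ _ ⟨hvis, hdE, hrE⟩ hfv hvv

lemma eqD (edges : List (Int × Int)) :
    ∀ fuel, EqAB (dfsA edges fuel) (dfsB (buildAdj edges) fuel) := by
  intro fuel
  induction fuel with
  | zero =>
    unfold EqAB
    intro u parent d sa sb hrel _ _
    simpa [dfsA, dfsB] using hrel
  | succ fuel ih =>
    unfold EqAB
    intro v parent d sa sb hrel hf hd
    obtain ⟨hvis, hdE, hrE⟩ := hrel
    simp only [dfsA, dfsB]
    rw [adj_find]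
    exact eqG v parent d (dfsA edges fuel) (dfsB (buildAdj edges) fuel) ih
      (presD edges fuel) hd (FindNodes v edges)
      { sa with visited := sa.visited.insert v d }
      { sb with depth := sb.depth.insert v d }
      ⟨by rw [hvis], hdE, hrE⟩
      (by simpa using hf)
      (by simp)

lemma topLoop (edges : List (Int × Int)) :
    ∀ (l : List Int) (sa : StA) (sb : StB), RelS sa sb →
      RelS (l.foldl (fun st v =>
            if st.visited.getD v 0 = 0 then
              dfsA edges (2 * edges.length + 2) v 1
                { st with father := st.father.insert v 1 }
            else st) sa)
          (l.foldl (fun st v =>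
            if st.depth.getD v 0 = 0 then
              dfsB (buildAdj edges) (2 * edges.length + 2) v 1 1 st
            else st) sb) := by
  intro l
  induction l with
  | nil => intro sa sb hrel; simpa using hrel
  | cons v l ih =>
    intro sa sb hrel
    obtain ⟨hvis, hdE, hrE⟩ := hrel
    simp only [List.foldl_cons]
    by_cases h0 : sa.visited.getD v 0 = 0
    · rw [if_pos h0, if_pos (show sb.depth.getD v 0 = 0 by rw [← hvis]; exact h0)]
      exact ih _ _ (eqD edges (2 * edges.length + 2) v 1 1
        { sa with father := sa.father.insert v 1 } sb
        ⟨hvis, hdE, hrE⟩ (by simp) (by omega))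
    · rw [if_neg h0, if_neg (show ¬ sb.depth.getD v 0 = 0 by rw [← hvis]; exact h0)]
      exact ih _ _ ⟨hvis, hdE, hrE⟩

-- ===== VERDICT (by name: the statement is the Claim_ definition above) =====
theorem DFS_spec : Claim_equal_DFS := by
  intro edges _
  unfold Spec_DFS DFS DFS_alt
  rw [← verts_eq]
  have h := topLoop edges (GetVertices edges)
    ⟨(GetVertices edges).foldl (fun d i => d.insert i 0) PySem.Dict.empty, [], [], PySem.Dict.empty⟩
    ⟨(GetVertices edges).foldl (fun d v => d.insert v 0) PySem.Dict.empty, [], []⟩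
    ⟨rfl, rfl, rfl⟩
  exact Prod.ext h.2.1 h.2.2
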